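-- pv_equiv track=rewrite | github.com/tkstanch/Megido | sql_attacker/tamper_scripts.py | overlongutf8
-- ===== SOURCE A (Python) =====
-- def overlongutf8(payload: str) -> str:
--     """
--     Convert characters to overlong UTF-8 encoding (for bypassing filters).
--     Example: ' => %C0%A7 or %E0%80%A7
--     """
--     # Simplified overlong UTF-8 for apostrophe and other special chars
--     replacements = {
--         "'": "%C0%A7",
--         '"': "%C0%A2",
--         '<': "%C0%BC",
--         '>': "%C0%BE",
--     }
--     result = payload
--     for char, encoded in replacements.items():
--         result = result.replace(char, encoded)
--     return result
-- ===== SOURCE B (Python) =====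
-- def _encode_char(c: str) -> str:
--     """Overlong UTF-8 encoding of one character (identity if not special)."""
--     if c == "'":
--         return "%C0%A7"
--     elif c == '"':
--         return "%C0%A2"
--     elif c == '<':
--         return "%C0%BC"
--     elif c == '>':
--         return "%C0%BE"
--     else:
--         return c
--
--
-- def overlongutf8(payload: str) -> str:
--     """
--     Convert characters to overlong UTF-8 encoding (for bypassing filters).
--     Example: ' => %C0%A7 or %E0%80%A7
--     """
--     pieces = []
--     for c in payload:
--         pieces.append(_encode_char(c))
--     return ''.join(pieces)
-- ===== Notes on version B (the rewrite author's own statement) =====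
-- stated objective: alternative
-- what changed: Replaces A's dict of four sequential full-string replace passes with a single left-to-right pass that encodes each character via an explicit branch chain into an accumulator list and joins it once.
import Mathlib
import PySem

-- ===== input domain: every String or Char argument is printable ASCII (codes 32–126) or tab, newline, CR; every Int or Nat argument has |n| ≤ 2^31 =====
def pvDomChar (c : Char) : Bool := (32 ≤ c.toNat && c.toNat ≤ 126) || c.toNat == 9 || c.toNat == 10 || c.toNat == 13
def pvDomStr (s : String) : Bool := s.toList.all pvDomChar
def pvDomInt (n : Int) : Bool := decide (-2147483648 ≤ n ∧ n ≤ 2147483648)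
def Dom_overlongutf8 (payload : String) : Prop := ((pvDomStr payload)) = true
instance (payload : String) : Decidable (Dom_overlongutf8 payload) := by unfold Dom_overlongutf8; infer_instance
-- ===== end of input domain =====

-- B replaces A's four sequential full-string replace passes with one left-to-right pass
-- encoding each character through an explicit branch chain (alternative decomposition; same result).

-- ===== PORT A =====
def overlongutf8 (payload : String) : String :=
  let replacements : PySem.Dict String String :=
    ((((PySem.Dict.empty).insert "'" "%C0%A7").insert "\"" "%C0%A2").insert "<" "%C0%BC").insert ">" "%C0%BE"
  replacements.items.foldl (fun result p => PySem.Str.replace result p.1 p.2) payload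

-- ===== PORT B =====
def encodeChar (c : Char) : String :=
  if c = '\'' then "%C0%A7"
  else if c = '"' then "%C0%A2"
  else if c = '<' then "%C0%BC"
  else if c = '>' then "%C0%BE"
  else String.ofList [c]

def overlongutf8_alt (payload : String) : String :=
  let pieces := payload.toList.foldl (fun acc c => acc ++ [encodeChar c]) []
  PySem.Str.join "" pieces

-- ===== PRECONDITION & SPEC =====
def Spec_overlongutf8 (payload : String) (out : String) : Prop := out = overlongutf8_alt payload
instance (payload : String) (out : String) : Decidable (Spec_overlongutf8 payload out) := by unfold Spec_overlongutf8; infer_instance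

-- ===== CLAIM (what is proved, stated in full; the proofs are below) =====
def Claim_equal_overlongutf8 : Prop := ∀ (payload : String), Dom_overlongutf8 payload → Spec_overlongutf8 payload (overlongutf8 payload)

-- ===== LEMMAS AND PROOFS =====

-- one step of str.replace with a single-char needle is a flatMap
theorem replace_go_single (c : Char) (new : List Char) :
    ∀ (l : List Char) (fuel : Nat) (acc : List Char), l.length ≤ fuel →
      PySem.Chars.replace.go [c] new fuel l acc
        = acc.reverse ++ l.flatMap (fun x => if x = c then new else [x]) := by
  intro l
  induction l with
  | nil => intro fuel acc _; cases fuel <;> simp [PySem.Chars.replace.go]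
  | cons x t ih =>
    intro fuel acc h
    cases fuel with
    | zero => simp at h
    | succ n =>
      simp only [PySem.Chars.replace.go]
      by_cases hx : x = c
      · subst hx
        have hpre : List.isPrefixOf [x] (x :: t) = true := by simp [List.isPrefixOf]
        rw [if_pos hpre]
        rw [show List.drop [x].length (x :: t) = t from rfl]
        rw [ih n (new.reverse ++ acc) (by simpa using Nat.le_of_succ_le_succ h)]
        simp
      · have hpre : List.isPrefixOf [c] (x :: t) = false := by
          simp [List.isPrefixOf]; exact fun hh => (hx hh.symm).elim
        rw [if_neg (by simp [hpre])]
        rw [ih n (x :: acc) (by simpa using Nat.le_of_succ_le_succ h)]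
        simp [hx]

theorem replace_single (c : Char) (new l : List Char) :
    PySem.Chars.replace l [c] new = l.flatMap (fun x => if x = c then new else [x]) := by
  rw [PySem.Chars.replace]
  simp only [List.isEmpty_cons]
  simpa using replace_go_single c new l l.length [] le_rfl

-- the per-character map realised by B's branch chain, at the List Char level
def pvG (x : Char) : List Char := (encodeChar x).toList

theorem chain_eq (l : List Char) :
    (((l.flatMap (fun x => if x = '\'' then "%C0%A7".toList else [x])).flatMap
        (fun x => if x = '"' then "%C0%A2".toList else [x])).flatMap
        (fun x => if x = '<' then "%C0%BC".toList else [x])).flatMap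
        (fun x => if x = '>' then "%C0%BE".toList else [x])
      = l.flatMap pvG := by
  induction l with
  | nil => rfl
  | cons x t ih =>
    simp only [List.flatMap_cons, List.flatMap_append] at *
    rw [ih]
    congr 1
    by_cases h1 : x = '\''
    · subst h1; decide
    · by_cases h2 : x = '"'
      · subst h2; decide
      · by_cases h3 : x = '<'
        · subst h3; decide
        · by_cases h4 : x = '>'
          · subst h4; decide
          · simp [pvG, encodeChar, h1, h2, h3, h4]

theorem join_nil_flatten (parts : List (List Char)) :
    PySem.Chars.join [] parts = parts.flatten := by
  induction parts with
  | nil => rfl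
  | cons p ps ih =>
    cases ps with
    | nil => simp [PySem.Chars.join, List.intercalate]
    | cons q qs =>
      simp only [PySem.Chars.join, List.intercalate] at *
      simp [List.intersperse] at *
      simpa using ih

theorem foldl_append_map (l : List Char) :
    ∀ acc : List String, l.foldl (fun acc c => acc ++ [encodeChar c]) acc
      = acc ++ l.map encodeChar := by
  induction l with
  | nil => simp
  | cons x t ih => intro acc; simp [List.foldl_cons, ih]

theorem alt_toList (payload : String) :
    (overlongutf8_alt payload).toList = payload.toList.flatMap pvG := by
  show (PySem.Str.join "" (payload.toList.foldl (fun acc c => acc ++ [encodeChar c]) [])).toList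
      = payload.toList.flatMap pvG
  rw [foldl_append_map, List.nil_append, PySem.Str.toList_join]
  have h0 : "".toList = ([] : List Char) := rfl
  rw [h0, join_nil_flatten, List.map_map, ← List.flatMap_def]
  rfl

theorem a_toList (payload : String) :
    (overlongutf8 payload).toList = payload.toList.flatMap pvG := by
  show (PySem.Str.replace (PySem.Str.replace (PySem.Str.replace (PySem.Str.replace payload "'" "%C0%A7") "\"" "%C0%A2") "<" "%C0%BC") ">" "%C0%BE").toList
      = payload.toList.flatMap pvG
  rw [PySem.Str.toList_replace, PySem.Str.toList_replace, PySem.Str.toList_replace, PySem.Str.toList_replace]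
  have e1 : "'".toList = ['\''] := rfl
  have e2 : "\"".toList = ['"'] := rfl
  have e3 : "<".toList = ['<'] := rfl
  have e4 : ">".toList = ['>'] := rfl
  rw [e1, e2, e3, e4, replace_single, replace_single, replace_single, replace_single]
  exact chain_eq payload.toList

-- ===== VERDICT (by name: the statement is the Claim_ definition above) =====
theorem overlongutf8_spec : Claim_equal_overlongutf8 := by
  intro payload _
  unfold Spec_overlongutf8
  rw [← String.toList_inj, a_toList, alt_toList]
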